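-- pv_equiv track=rewrite | github.com/ubiratanpaniago/ic-otimizacao | src/HZZ.py | h_zz_compacto
-- ===== SOURCE A (Python) =====
-- def h_zz_compacto(width, height):
--     lp = []
--     for y in range(height):
--         linha = [(x, y) for x in range(width)]
--         # Se for ímpar, inverte a lista daquela linha
--         if y % 2 != 0:
--             linha = linha[::-1]
--         lp.extend(linha)
--     return lp
-- ===== SOURCE B (Python) =====
-- def h_zz_compacto(width, height):
--     if width <= 0 or height <= 0:
--         return []
--     out = []
--     for i in range(width * height):
--         y, r = divmod(i, width)
--         x = r if y % 2 == 0 else width - 1 - r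
--         out.append((x, y))
--     return out
-- ===== Notes on version B (the rewrite author's own statement) =====
-- stated objective: alternative
-- what changed: Replaces the per-row list comprehension with conditional slice reversal and extend by a single flat loop over width*height cell indices deriving each (x,y) arithmetically via divmod.
import Mathlib
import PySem

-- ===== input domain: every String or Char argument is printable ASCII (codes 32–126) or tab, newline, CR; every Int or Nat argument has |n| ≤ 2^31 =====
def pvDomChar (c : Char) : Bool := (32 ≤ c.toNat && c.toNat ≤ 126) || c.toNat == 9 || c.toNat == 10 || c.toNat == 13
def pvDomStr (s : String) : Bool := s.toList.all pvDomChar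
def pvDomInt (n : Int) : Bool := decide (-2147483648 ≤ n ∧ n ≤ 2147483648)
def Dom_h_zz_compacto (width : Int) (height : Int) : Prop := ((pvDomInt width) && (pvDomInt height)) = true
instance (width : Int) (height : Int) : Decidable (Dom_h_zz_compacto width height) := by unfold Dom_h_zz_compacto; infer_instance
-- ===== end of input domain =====

-- B replaces A's per-row build / conditional slice reversal / extend by one flat loop over
-- width*height cell indices, deriving each (x, y) arithmetically with divmod (objective: alternative).

-- ===== PORT A =====
def h_zz_compacto (width : Int) (height : Int) : List (Int × Int) :=
  (PySem.List.pyRange 0 height 1).foldl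
    (fun lp y =>
      let linha := (PySem.List.pyRange 0 width 1).map (fun x => (x, y))
      let linha := if PySem.Int.mod y 2 ≠ 0 then linha.reverse else linha
      lp ++ linha)
    []

-- ===== PORT B =====
def h_zz_compacto_alt (width : Int) (height : Int) : List (Int × Int) :=
  if width ≤ 0 ∨ height ≤ 0 then []
  else
    (PySem.List.pyRange 0 (width * height) 1).foldl
      (fun out i =>
        let y := PySem.Int.floordiv i width
        let r := PySem.Int.mod i width
        let x := if PySem.Int.mod y 2 = 0 then r else width - 1 - r
        out ++ [(x, y)])
      []

-- ===== PRECONDITION & SPEC =====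
def Spec_h_zz_compacto (width : Int) (height : Int) (out : List (Int × Int)) : Prop := out = h_zz_compacto_alt width height
instance (width : Int) (height : Int) (out : List (Int × Int)) : Decidable (Spec_h_zz_compacto width height out) := by unfold Spec_h_zz_compacto; infer_instance

-- ===== CLAIM (what is proved, stated in full; the proofs are below) =====
def Claim_equal_h_zz_compacto : Prop := ∀ (width : Int) (height : Int), Dom_h_zz_compacto width height → Spec_h_zz_compacto width height (h_zz_compacto width height)

-- ===== LEMMAS AND PROOFS =====

-- A's row y, and B's cell at flat index i, as proof-side abbreviations.
def pvRow (w : Int) (y : Int) : List (Int × Int) :=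
  if PySem.Int.mod y 2 ≠ 0 then ((PySem.List.pyRange 0 w 1).map (fun x => (x, y))).reverse
  else (PySem.List.pyRange 0 w 1).map (fun x => (x, y))

def pvCell (w : Int) (i : Int) : Int × Int :=
  (if PySem.Int.mod (PySem.Int.floordiv i w) 2 = 0 then PySem.Int.mod i w
   else w - 1 - PySem.Int.mod i w, PySem.Int.floordiv i w)

lemma pvA_flatMap (w h : Int) :
    h_zz_compacto w h = (PySem.List.pyRange 0 h 1).flatMap (pvRow w) := by
  unfold h_zz_compacto pvRow
  exact PySem.List.foldl_append_eq_flatMap _ _ _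

lemma pvFloordiv_block (w : Int) (hw : 0 < w) (n k : Nat) (hk : (k : Int) < w) :
    PySem.Int.floordiv (w * n + k) w = n := by
  rw [PySem.Int.floordiv_eq_iff_of_pos hw]
  have h1 : (n : Int) * w = w * n := mul_comm _ _
  have h2 : ((n : Int) + 1) * w = w * n + w := by ring
  have hk0 : (0 : Int) ≤ k := Int.natCast_nonneg k
  constructor <;> [linarith; linarith]

lemma pvMod_block (w : Int) (hw : 0 < w) (n k : Nat) (hk : (k : Int) < w) :
    PySem.Int.mod (w * n + k) w = k := by
  have := PySem.Int.floordiv_mul_add_mod (w * n + k) w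
  rw [pvFloordiv_block w hw n k hk] at this
  have h1 : (n : Int) * w = w * n := mul_comm _ _
  linarith

lemma pvRow_eq (w : Int) (hw : 0 < w) (n : Nat) :
    pvRow w n = (PySem.List.pyRange (w * n) (w * n + w) 1).map (pvCell w) := by
  have hlen : (PySem.List.pyRange (w * n) (w * n + w) 1).length = w.toNat := by
    simp [PySem.List.length_pyRange_one]
  unfold pvRow pvCell
  by_cases hc : PySem.Int.mod (n : Int) 2 ≠ 0
  · rw [if_pos hc]
    apply List.ext_getElem
    · simp [hlen, PySem.List.length_pyRange_one]
    · intro k h1 h2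
      have hkW : k < w.toNat := by
        rw [List.length_map, hlen] at h2; exact h2
      have hkw : (k : Int) < w := by omega
      rw [List.getElem_reverse, List.getElem_map, List.getElem_map,
          PySem.List.getElem_pyRange_one, PySem.List.getElem_pyRange_one,
          pvFloordiv_block w hw n k hkw, pvMod_block w hw n k hkw]
      rw [if_neg (show ¬ PySem.Int.mod (n : Int) 2 = 0 from by simpa using hc)]
      simp [PySem.List.length_pyRange_one]
      omega
  · rw [if_neg hc]
    apply List.ext_getElem
    · simp [hlen, PySem.List.length_pyRange_one]
    · intro k h1 h2
      have hkW : k < w.toNat := by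
        rw [List.length_map, hlen] at h2; exact h2
      have hkw : (k : Int) < w := by omega
      rw [List.getElem_map, List.getElem_map,
          PySem.List.getElem_pyRange_one, PySem.List.getElem_pyRange_one,
          pvFloordiv_block w hw n k hkw, pvMod_block w hw n k hkw]
      simp at hc
      simp [hc]

lemma pvKey (w : Int) (hw : 0 < w) (m : Nat) :
    (PySem.List.pyRange 0 (m : Int) 1).flatMap (pvRow w)
      = (PySem.List.pyRange 0 (w * m) 1).map (pvCell w) := by
  induction m with
  | zero => simp [PySem.List.pyRange_one_eq_nil]
  | succ n ih =>
    have hcast : ((n + 1 : Nat) : Int) = (n : Int) + 1 := by push_cast; ring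
    have hsplit : PySem.List.pyRange 0 ((n : Int) + 1) 1
        = PySem.List.pyRange 0 (n : Int) 1 ++ [(n : Int)] :=
      PySem.List.pyRange_one_succ_right (by positivity)
    have hwn : (0 : Int) ≤ w * n := by positivity
    have hmul : w * ((n : Int) + 1) = w * n + w := by ring
    have hsplit2 : PySem.List.pyRange 0 (w * n + w) 1
        = PySem.List.pyRange 0 (w * n) 1 ++ PySem.List.pyRange (w * n) (w * n + w) 1 :=
      PySem.List.pyRange_one_append 0 (w * n) (w * n + w) hwn (by omega)
    rw [hcast, hsplit, hmul, hsplit2, List.flatMap_append, List.map_append, ih]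
    simp [pvRow_eq w hw n]

lemma pvMain (w h : Int) : h_zz_compacto w h = h_zz_compacto_alt w h := by
  by_cases hdeg : w ≤ 0 ∨ h ≤ 0
  · rw [pvA_flatMap]
    unfold h_zz_compacto_alt
    rw [if_pos hdeg]
    rcases hdeg with hw | hh
    · apply List.flatMap_eq_nil_iff.mpr
      intro y _
      unfold pvRow
      simp [PySem.List.pyRange_one_eq_nil hw]
    · simp [PySem.List.pyRange_one_eq_nil hh]
  · have hw : 0 < w := by omega
    have hh : 0 < h := by omega
    obtain ⟨m, rfl⟩ : ∃ m : Nat, h = (m : Int) := ⟨h.toNat, by omega⟩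
    rw [pvA_flatMap, pvKey w hw m]
    unfold h_zz_compacto_alt
    rw [if_neg (by omega)]
    rw [show (fun (out : List (Int × Int)) (i : Int) =>
        let y := PySem.Int.floordiv i w
        let r := PySem.Int.mod i w
        let x := if PySem.Int.mod y 2 = 0 then r else w - 1 - r
        out ++ [(x, y)]) = (fun out i => out ++ [pvCell w i]) from rfl]
    rw [PySem.List.foldl_append_singleton_eq_map]
    simp

-- ===== VERDICT (by name: the statement is the Claim_ definition above) =====
theorem h_zz_compacto_spec : Claim_equal_h_zz_compacto := by
  intro w h _
  unfold Spec_h_zz_compacto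
  exact pvMain w h
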